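-- pv_equiv track=rewrite | github.com/neek88/General | hdl_programming/VHDL modules/FIR_Filter/FIR_filter_simulation/sig_util.py | down_sample_split_path
-- ===== SOURCE A (Python) =====
-- def down_sample_split_path(signal,Nds):
--
--     #########################
--     # s8,  s4, s0  ->  path 1
--     # s9,  s5, s1  ->  path 2
--     # s10, s6, s2  ->  path 3
--     # s11, s7, s3  ->  path 4
--     #########################
--
--     # empty list to hold path lists
--     s_ds = []
--
--     # for each path, a new 'empty' list is appended
--     for path in range(Nds):
--         s_ds.append(list([]))
--
--     # run through signal list, each path gets one sample
--     # then, go back to first path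
--     for path in range(Nds):
--         for s in range(len(signal)):
--             if(s % Nds == path): s_ds[path].append(signal[s])
--     return s_ds
-- ===== SOURCE B (Python) =====
-- def down_sample_split_path(sig, Nds):
--     # path p is exactly the strided slice starting at p: one slice per path
--     return [sig[p::Nds] for p in range(Nds)]
-- ===== Notes on version B (the rewrite author's own statement) =====
-- stated objective: faster
-- what changed: A allocates Nds empty buckets and rescans the whole signal once per path testing s % Nds == path; B builds each path directly as the strided slice signal[p::Nds], one slice per path and no modulo test at all.
import Mathlib
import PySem

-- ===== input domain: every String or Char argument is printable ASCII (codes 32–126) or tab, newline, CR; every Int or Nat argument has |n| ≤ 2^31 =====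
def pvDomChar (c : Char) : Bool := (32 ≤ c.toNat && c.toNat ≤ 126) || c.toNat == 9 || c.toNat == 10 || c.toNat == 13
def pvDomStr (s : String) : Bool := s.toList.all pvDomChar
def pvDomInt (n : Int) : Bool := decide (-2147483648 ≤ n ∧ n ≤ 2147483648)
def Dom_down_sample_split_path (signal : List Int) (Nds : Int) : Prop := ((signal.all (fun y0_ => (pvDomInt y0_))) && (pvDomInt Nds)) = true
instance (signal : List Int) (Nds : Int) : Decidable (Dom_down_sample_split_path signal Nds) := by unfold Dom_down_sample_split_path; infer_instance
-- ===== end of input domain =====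

-- B replaces A's per-path rescans of the signal (with an s % Nds == path test) by one strided slice signal[p::Nds] per path (faster).


-- ===== PORT A =====
-- every executed s_ds[path] / signal[s] access is in range, so List.modify at path.toNat
-- and pyGetD with an unused default are exact transliterations of the list accesses
def down_sample_split_path (signal : List Int) (Nds : Int) : List (List Int) :=
  let s_ds : List (List Int) :=
    (PySem.List.pyRange 0 Nds).foldl (fun acc _ => acc ++ [([] : List Int)]) []
  (PySem.List.pyRange 0 Nds).foldl (fun sds path =>
    (PySem.List.pyRange 0 (PySem.List.len signal)).foldl (fun sds s =>
      if PySem.Int.mod s Nds == path then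
        sds.modify path.toNat (fun l => l ++ [PySem.List.pyGetD signal s 0])
      else sds) sds) s_ds

-- ===== PORT B =====
-- every executed slice signal[p::Nds] has 0 ≤ p and step Nds ≥ 1 (p runs over range(Nds)),
-- so slice? is some there and the `.getD []` default is never taken
def down_sample_split_path_alt (signal : List Int) (Nds : Int) : List (List Int) :=
  (PySem.List.pyRange 0 Nds).map (fun p => (PySem.List.slice? signal (some p) none Nds).getD [])

-- ===== PRECONDITION & SPEC =====
def Spec_down_sample_split_path (signal : List Int) (Nds : Int) (out : List (List Int)) : Prop := out = down_sample_split_path_alt signal Nds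
instance (signal : List Int) (Nds : Int) (out : List (List Int)) : Decidable (Spec_down_sample_split_path signal Nds out) := by unfold Spec_down_sample_split_path; infer_instance

-- ===== CLAIM (what is proved, stated in full; the proofs are below) =====
def Claim_equal_down_sample_split_path : Prop := ∀ (signal : List Int) (Nds : Int), Dom_down_sample_split_path signal Nds → Spec_down_sample_split_path signal Nds (down_sample_split_path signal Nds)

-- ===== LEMMAS AND PROOFS =====

-- pvSel Nds p a sig : the sub-signal of sig whose absolute indices (starting at a) are ≡ p mod Nds
def pvSel (Nds p : Int) : Int → List Int → List Int
  | _, [] => []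
  | a, x :: xs => (if PySem.Int.mod a Nds == p then [x] else []) ++ pvSel Nds p (a + 1) xs

-- pvSelRel N p sig : the sub-signal of sig at relative indices p, p+N, p+2N, … (Nat form)
def pvSelRel (N : Nat) : Nat → List Int → List Int
  | _, [] => []
  | p, x :: xs => if p = 0 then x :: pvSelRel N (N - 1) xs else pvSelRel N (p - 1) xs

-- pvMerge c k L : append c (k+i) to the i-th bucket of L
def pvMerge (c : Nat → List Int) : Nat → List (List Int) → List (List Int)
  | _, [] => []
  | k, l :: ls => (l ++ c k) :: pvMerge c (k + 1) ls

theorem pvMerge_congr (c c' : Nat → List Int) :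
    ∀ (L : List (List Int)) (k : Nat), (∀ j, k ≤ j → j < k + L.length → c j = c' j) →
    pvMerge c k L = pvMerge c' k L := by
  intro L
  induction L with
  | nil => intro k _; rfl
  | cons l ls ih =>
      intro k h
      simp only [pvMerge, List.cons.injEq]
      refine ⟨by rw [h k (le_refl k) (by simp)], ih (k + 1) ?_⟩
      intro j h1 h2
      exact h j (by omega) (by simp only [List.length_cons]; omega)

theorem pvMerge_empty : ∀ (L : List (List Int)) (k : Nat), pvMerge (fun _ => []) k L = L := by
  intro L
  induction L with
  | nil => intro k; rfl
  | cons l ls ih => intro k; simp [pvMerge, ih]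

theorem pvModify_modify {α : Type} (L : List α) (i : Nat) (f g : α → α) :
    (L.modify i f).modify i g = L.modify i (fun v => g (f v)) := by
  apply List.ext_getElem <;> simp [List.getElem_modify]
  intro j h1 h2; split <;> simp_all

theorem pvMerge_modify (c : Nat → List Int) (s : List Int) :
    ∀ (L : List (List Int)) (k i : Nat),
    (pvMerge c k L).modify i (fun l => l ++ s)
      = pvMerge (fun j => if j = k + i then c j ++ s else c j) k L := by
  intro L
  induction L with
  | nil => intro k i; simp [pvMerge]
  | cons l ls ih =>
      intro k i
      cases i with
      | zero =>
          simp only [pvMerge, List.modify_zero_cons, Nat.add_zero, List.cons.injEq]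
          refine ⟨by simp, ?_⟩
          exact (pvMerge_congr _ _ ls (k + 1) (by intro j h1 h2; rw [if_neg (by omega)])).symm
      | succ i =>
          simp only [pvMerge, List.modify_succ_cons, List.cons.injEq]
          refine ⟨by rw [if_neg (by omega)], ?_⟩
          rw [ih (k + 1) i]
          exact pvMerge_congr _ _ ls (k + 1) (by intro j h1 h2; congr 1; simp; omega)

-- A's inner loop for a fixed path appends exactly pvSel to that path's bucket
theorem pvA_inner (Nds path : Int) :
    ∀ (sig : List Int) (a : Int) (L : List (List Int)),
    (PySem.List.enumerate sig a).foldl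
        (fun sds sx => if PySem.Int.mod sx.1 Nds == path then
            sds.modify path.toNat (fun l => l ++ [sx.2]) else sds) L
      = L.modify path.toNat (fun l => l ++ pvSel Nds path a sig) := by
  intro sig
  induction sig with
  | nil =>
      intro a L
      rw [PySem.List.enumerate_nil]
      simp only [List.foldl_nil, pvSel, List.append_nil]
      apply List.ext_getElem <;> simp [List.getElem_modify]
  | cons x xs ih =>
      intro a L
      rw [PySem.List.enumerate_cons, List.foldl_cons]
      by_cases hc : (PySem.Int.mod a Nds == path) = true
      · rw [if_pos hc, ih (a + 1), pvModify_modify]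
        congr 1; funext v
        simp [pvSel, hc, List.append_assoc]
      · rw [if_neg hc, ih (a + 1)]
        congr 1; funext v
        simp [pvSel, hc]

-- A's outer loop over range(m) applies each path's modification once
theorem pvA_range (g : Nat → List Int) :
    ∀ (m : Nat) (L : List (List Int)),
    (List.range m).foldl (fun st k => st.modify k (fun l => l ++ g k)) L
      = pvMerge (fun k => if k < m then g k else []) 0 L := by
  intro m
  induction m with
  | zero =>
      intro L
      simp only [List.range_zero, List.foldl_nil]
      rw [show (fun k => if k < 0 then g k else []) = (fun _ : Nat => ([] : List Int)) from
        funext (fun k => by simp), pvMerge_empty]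
  | succ m ih =>
      intro L
      rw [List.range_succ, List.foldl_append, List.foldl_cons, List.foldl_nil, ih, pvMerge_modify]
      refine pvMerge_congr _ _ L 0 ?_
      intro j _ _
      by_cases hj : j = m
      · subst hj; simp
      · simp only [Nat.zero_add, if_neg hj]
        by_cases h2 : j < m
        · rw [if_pos h2, if_pos (by omega)]
        · rw [if_neg h2, if_neg (by omega)]

theorem pvInit_eq (Nds : Int) :
    (PySem.List.pyRange 0 Nds).foldl (fun acc _ => acc ++ [([] : List Int)]) []
      = (PySem.List.pyRange 0 Nds).map (fun _ => ([] : List Int)) := by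
  rw [show (fun (acc : List (List Int)) (_ : Int) => acc ++ [([] : List Int)])
        = (fun (acc : List (List Int)) (x : Int) => acc ++ [(fun _ => ([] : List Int)) x]) from rfl,
      PySem.List.foldl_append_singleton_eq_map, List.nil_append]

theorem pvA_char (signal : List Int) (Nds : Int) (hN : 1 ≤ Nds) :
    down_sample_split_path signal Nds
      = pvMerge (fun p => pvSel Nds (↑p) 0 signal) 0
          ((PySem.List.pyRange 0 Nds).map (fun _ => ([] : List Int))) := by
  unfold down_sample_split_path
  rw [pvInit_eq]
  have hinner : ∀ (L : List (List Int)) (path : Int),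
      (PySem.List.pyRange 0 (PySem.List.len signal)).foldl (fun sds s =>
        if PySem.Int.mod s Nds == path then
          sds.modify path.toNat (fun l => l ++ [PySem.List.pyGetD signal s 0])
        else sds) L
      = L.modify path.toNat (fun l => l ++ pvSel Nds path 0 signal) := by
    intro L path
    have hmap := PySem.List.enumerate_eq_map_pyRange signal (0 : Int)
    calc (PySem.List.pyRange 0 (PySem.List.len signal)).foldl (fun sds s =>
            if PySem.Int.mod s Nds == path then
              sds.modify path.toNat (fun l => l ++ [PySem.List.pyGetD signal s 0])
            else sds) L
        = (PySem.List.enumerate signal).foldl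
            (fun sds sx => if PySem.Int.mod sx.1 Nds == path then
              sds.modify path.toNat (fun l => l ++ [sx.2]) else sds) L := by
          rw [hmap, List.foldl_map]
      _ = L.modify path.toNat (fun l => l ++ pvSel Nds path 0 signal) := pvA_inner Nds path signal 0 L
  rw [PySem.List.foldl_congr_mem _ _ _ _ (fun L path _ => hinner L path)]
  obtain ⟨n, hn⟩ : ∃ n : Nat, Nds = (n : Int) := ⟨Nds.toNat, by omega⟩
  subst hn
  rw [PySem.List.pyRange_zero_natCast, List.foldl_map]
  have hcast : ∀ (st : List (List Int)) (k : Nat),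
      st.modify ((k : Int)).toNat (fun l => l ++ pvSel (n : Int) (↑k) 0 signal)
        = st.modify k (fun l => l ++ pvSel (n : Int) (↑k) 0 signal) := by
    intro st k; rw [Int.toNat_natCast]
  rw [PySem.List.foldl_congr_mem (List.range n) _ _ _ (fun st k _ => hcast st k)]
  rw [pvA_range]
  refine pvMerge_congr _ _ _ 0 ?_
  intro j _ hj
  rw [if_pos]
  simp only [Nat.zero_add, List.length_map, List.length_range] at hj
  omega

-- merging into all-empty buckets just lists the contributions
theorem pvMerge_replicate (c : Nat → List Int) :
    ∀ (n k : Nat),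
    pvMerge c k (List.replicate n ([] : List Int))
      = (List.range n).map (fun i => c (k + i)) := by
  intro n
  induction n with
  | zero => intro k; rfl
  | succ m ih =>
      intro k
      simp only [List.replicate_succ, pvMerge, List.nil_append,
        List.range_succ_eq_map, List.map_cons, List.map_map]
      rw [ih (k + 1)]
      refine List.cons_eq_cons.mpr ⟨by simp, ?_⟩
      apply List.map_congr_left
      intro i _
      simp only [Function.comp_apply, Nat.succ_eq_add_one]
      congr 1
      omega

-- a start index past the end selects nothing
theorem pvSelRel_nil_of_ge (N : Nat) :
    ∀ (xs : List Int) (p : Nat), xs.length ≤ p → pvSelRel N p xs = [] := by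
  intro xs
  induction xs with
  | nil => intro p _; rfl
  | cons x xs ih =>
      intro p hp
      simp only [List.length_cons] at hp
      rw [pvSelRel, if_neg (by omega)]
      exact ih (p - 1) (by omega)

-- the strided index picks of Python's slice machinery compute pvSelRel (count large enough)
theorem pvStride (N : Nat) (hN : 1 ≤ N) :
    ∀ (xs : List Int) (p c : Nat), xs.length ≤ p + N * c →
    List.filterMap (fun k => xs[p + N * k]?) (List.range c) = pvSelRel N p xs := by
  intro xs
  induction xs with
  | nil =>
      intro p c _
      simp [pvSelRel]
  | cons x xs ih =>
      intro p c h
      cases p with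
      | zero =>
          cases c with
          | zero => simp at h
          | succ c' =>
              rw [List.range_succ_eq_map, List.filterMap_cons]
              simp only [Nat.mul_zero, Nat.add_zero, List.getElem?_cons_zero]
              rw [List.filterMap_map]
              have harith : ∀ k : Nat, 0 + N * (k + 1) = (N - 1 + N * k) + 1 := by
                intro k; have : N * (k + 1) = N * k + N := by ring
                omega
              have hfun : List.filterMap ((fun k => (x :: xs)[0 + N * k]?) ∘ Nat.succ) (List.range c')
                  = List.filterMap (fun k => xs[N - 1 + N * k]?) (List.range c') := by
                apply List.filterMap_congr
                intro k _
                simp only [Function.comp_apply, Nat.succ_eq_add_one, harith k,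
                  List.getElem?_cons_succ]
              rw [hfun, ih (N - 1) c' (by
                have h1 : N * (c' + 1) = N * c' + N := by ring
                simp only [List.length_cons] at h
                omega)]
              rw [pvSelRel, if_pos rfl]
      | succ p' =>
          have hfun : List.filterMap (fun k => (x :: xs)[p' + 1 + N * k]?) (List.range c)
              = List.filterMap (fun k => xs[p' + N * k]?) (List.range c) := by
            apply List.filterMap_congr
            intro k _
            have : p' + 1 + N * k = (p' + N * k) + 1 := by omega
            rw [this, List.getElem?_cons_succ]
          rw [hfun, ih p' c (by simp only [List.length_cons] at h; omega)]
          rw [pvSelRel, if_neg (by omega)]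
          simp

-- Python's slice xs[p::N] (0 ≤ p, 1 ≤ N) is exactly pvSelRel
theorem pvSlice?_stride (xs : List Int) (N p : Int) (hN : 1 ≤ N) (hp : 0 ≤ p) :
    PySem.List.slice? xs (some p) none N = some (pvSelRel N.toNat p.toNat xs) := by
  have hN0 : ¬ N = 0 := by omega
  have hNneg : ¬ N < 0 := by omega
  have hpneg : ¬ p < 0 := by omega
  simp only [PySem.List.slice?, PySem.List.sliceIndices, if_neg hN0, if_neg hNneg,
    if_neg hpneg, if_pos (by omega : 0 < N)]
  by_cases hlt : p < (xs.length : Int)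
  · have hmin : min p (xs.length : Int) = p := min_eq_left (le_of_lt hlt)
    rw [hmin, if_pos hlt]
    congr 1
    set a : Int := (xs.length : Int) - p + N - 1 with ha
    have ha0 : 0 ≤ a := by omega
    have hq0 : 0 ≤ a / N := Int.ediv_nonneg ha0 (by omega)
    have hmod := Int.mul_ediv_add_emod a N
    have hmlt : a % N < N := Int.emod_lt_of_pos a (by omega)
    have hm0 : 0 ≤ a % N := Int.emod_nonneg a (by omega)
    have hNq : (xs.length : Int) - p ≤ N * (a / N) := by omega
    have hcastq : ((a / N).toNat : Int) = a / N := Int.toNat_of_nonneg hq0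
    have hcastp : (p.toNat : Int) = p := Int.toNat_of_nonneg hp
    have hcastN : (N.toNat : Int) = N := Int.toNat_of_nonneg (by omega)
    have hidx : ∀ k : Nat, (p + N * (k : Int)).toNat = p.toNat + N.toNat * k := by
      intro k
      have : p + N * (k : Int) = ((p.toNat + N.toNat * k : Nat) : Int) := by
        push_cast [hcastp, hcastN]; ring
      rw [this, Int.toNat_natCast]
    have hfun : List.filterMap (fun k : Nat => xs[(p + N * (k : Int)).toNat]?)
          (List.range (a / N).toNat)
        = List.filterMap (fun k : Nat => xs[p.toNat + N.toNat * k]?) (List.range (a / N).toNat) := by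
      apply List.filterMap_congr
      intro k _
      rw [hidx k]
    rw [hfun]
    apply pvStride N.toNat (by omega)
    have hmulcast : ((N.toNat * (a / N).toNat : Nat) : Int) = N * (a / N) := by
      push_cast [hcastN, hcastq]; ring
    omega
  · have hmin : min p (xs.length : Int) = (xs.length : Int) := min_eq_right (by omega)
    rw [hmin, if_neg (by omega)]
    simp only [List.range_zero, List.filterMap_nil]
    rw [pvSelRel_nil_of_ge N.toNat xs p.toNat (by omega)]

-- absolute-index selection is relative-index selection at the rotated start
theorem pvSel_eq_rel (N p : Int) (hN : 1 ≤ N) (hp : 0 ≤ p) (hpN : p < N) :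
    ∀ (xs : List Int) (a : Int),
    pvSel N p a xs = pvSelRel N.toNat ((p - a) % N).toNat xs := by
  intro xs
  induction xs with
  | nil => intro a; rfl
  | cons y ys ih =>
      intro a
      have hmodeq := PySem.Int.mod_eq_emod_of_pos (a := a) (b := N) (by omega)
      have hm0 : 0 ≤ (p - a) % N := Int.emod_nonneg _ (by omega)
      have hmlt : (p - a) % N < N := Int.emod_lt_of_pos _ (by omega)
      rw [pvSel, ih (a + 1), pvSelRel]
      by_cases hc : a % N = p
      · have hz : (p - a) % N = 0 := by
          have : p % N = a % N := by rw [hc, Int.emod_eq_of_lt hp hpN]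
          exact Int.emod_eq_emod_iff_emod_sub_eq_zero.mp this
        have hnext : (p - (a + 1)) % N = N - 1 := by
          have hdvd : N ∣ p - a := Int.dvd_of_emod_eq_zero hz
          have hdvd2 : N ∣ (p - (a + 1)) - (N - 1) := by
            have : (p - (a + 1)) - (N - 1) = (p - a) - N := by ring
            rw [this]; exact dvd_sub hdvd dvd_rfl
          have : (p - (a + 1)) % N = (N - 1) % N :=
            Int.emod_eq_emod_iff_emod_sub_eq_zero.mpr (Int.emod_eq_zero_of_dvd hdvd2)
          rw [this, Int.emod_eq_of_lt (by omega) (by omega)]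
        rw [if_pos (by simp [hmodeq, hc]), hz, hnext, if_pos (by omega)]
        have ht : (N - 1 : Int).toNat = N.toNat - 1 := by omega
        rw [ht, List.singleton_append]
      · have hnz : ¬ (p - a) % N = 0 := by
          intro hz
          apply hc
          have : p % N = a % N := Int.emod_eq_emod_iff_emod_sub_eq_zero.mpr hz
          rw [Int.emod_eq_of_lt hp hpN] at this
          omega
        have hnext : (p - (a + 1)) % N = (p - a) % N - 1 := by
          have hdvd : N ∣ (p - (a + 1)) - ((p - a) % N - 1) := by
            have he : (p - (a + 1)) - ((p - a) % N - 1) = (p - a) - (p - a) % N := by ring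
            rw [he]
            have := Int.mul_ediv_add_emod (p - a) N
            exact ⟨(p - a) / N, by omega⟩
          have h1 : (p - (a + 1)) % N = ((p - a) % N - 1) % N :=
            Int.emod_eq_emod_iff_emod_sub_eq_zero.mpr (Int.emod_eq_zero_of_dvd hdvd)
          rw [h1, Int.emod_eq_of_lt (by omega) (by omega)]
        rw [if_neg (by simp [hmodeq, hc]), hnext, if_neg (by omega)]
        have ht : ((p - a) % N - 1).toNat = ((p - a) % N).toNat - 1 := by omega
        rw [ht, List.nil_append]

-- A computes the list of relative-index selections, path by path
theorem pvA_map (signal : List Int) (Nds : Int) (hN : 1 ≤ Nds) :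
    down_sample_split_path signal Nds
      = (List.range Nds.toNat).map (fun i => pvSelRel Nds.toNat i signal) := by
  rw [pvA_char signal Nds hN, List.map_const', pvMerge_replicate]
  simp only [PySem.List.length_pyRange_one, Int.sub_zero]
  apply List.map_congr_left
  intro i hi
  simp only [List.mem_range] at hi
  have hi' : (i : Int) < Nds := by omega
  rw [Nat.zero_add, pvSel_eq_rel Nds (↑i) hN (by omega) hi' signal 0]
  congr 1
  rw [Int.sub_zero, Int.emod_eq_of_lt (by omega) hi', Int.toNat_natCast]

-- B computes the same list, path by path
theorem pvB_map (signal : List Int) (Nds : Int) (hN : 1 ≤ Nds) :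
    down_sample_split_path_alt signal Nds
      = (List.range Nds.toNat).map (fun i => pvSelRel Nds.toNat i signal) := by
  unfold down_sample_split_path_alt
  obtain ⟨n, hn⟩ : ∃ n : Nat, Nds = (n : Int) := ⟨Nds.toNat, by omega⟩
  subst hn
  rw [PySem.List.pyRange_zero_natCast, List.map_map]
  apply List.map_congr_left
  intro k _
  simp only [Function.comp_apply]
  rw [pvSlice?_stride signal (↑n) (↑k) (by omega) (by omega)]
  rfl

-- ===== VERDICT (by name: the statement is the Claim_ definition above) =====
theorem down_sample_split_path_spec : Claim_equal_down_sample_split_path := by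
  intro signal Nds _hdom
  unfold Spec_down_sample_split_path
  by_cases hN : 1 ≤ Nds
  · rw [pvA_map signal Nds hN, pvB_map signal Nds hN]
  · have hr : PySem.List.pyRange 0 Nds = [] := by
      simp [PySem.List.pyRange]; omega
    simp [down_sample_split_path, down_sample_split_path_alt, hr]
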